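-- pv_equiv track=rewrite | github.com/RouzbehHasheminezhad/WAW-2023-RYF | collect.py | transfer_edges
-- ===== SOURCE A (Python) =====
-- def transfer_edges(edges_list):
--     index_map = {}
--     index = 0
--     edges = []
--
--     for i in range(len(edges_list)):
--         u, v = edges_list[i]
--         if u not in index_map:
--             index_map[u] = index
--             index += 1
--         if v not in index_map:
--             index_map[v] = index
--             index += 1
--         edges.append((index_map[u], index_map[v]))
--
--     return edges
-- ===== SOURCE B (Python) =====
-- def transfer_edges(edges_list):
--     # Sort-based ranking: compute each vertex's FIRST-occurrence position by a
--     # single reverse pass (later writes win, so the smallest index survives),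
--     # then rank vertices by sorting on that position, then map the edges.
--     flat = [x for e in edges_list for x in e]
--     first = {}
--     i = len(flat)
--     for x in reversed(flat):
--         i -= 1
--         first[x] = i
--     order = sorted(first, key=first.get)
--     rank = {x: r for r, x in enumerate(order)}
--     return [(rank[u], rank[v]) for u, v in edges_list]
-- ===== Notes on version B (the rewrite author's own statement) =====
-- stated objective: alternative
-- what changed: A assigns indices incrementally with a counter inside a single forward pass; B instead computes each vertex's first-occurrence position by one reverse pass over the flattened endpoints (later writes overwrite, so the minimal index survives), obtains the vertex order by SORTING vertices on that position, and maps the edges through the resulting rank table.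
import Mathlib
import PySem

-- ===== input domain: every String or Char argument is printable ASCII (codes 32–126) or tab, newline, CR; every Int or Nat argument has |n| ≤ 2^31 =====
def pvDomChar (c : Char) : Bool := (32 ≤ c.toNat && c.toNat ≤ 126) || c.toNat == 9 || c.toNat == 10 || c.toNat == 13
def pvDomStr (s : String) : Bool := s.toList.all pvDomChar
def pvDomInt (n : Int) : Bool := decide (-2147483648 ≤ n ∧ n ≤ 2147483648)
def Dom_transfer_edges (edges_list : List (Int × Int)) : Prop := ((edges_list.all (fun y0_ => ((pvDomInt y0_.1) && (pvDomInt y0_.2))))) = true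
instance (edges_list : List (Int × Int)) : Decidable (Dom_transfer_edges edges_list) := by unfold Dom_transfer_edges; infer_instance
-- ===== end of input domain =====

-- B replaces A's incremental-counter pass by a reverse pass computing first-occurrence
-- positions followed by a sort-based ranking; objective: alternative.

-- ===== PORT A =====
-- one iteration of A's for-loop: state = (index_map, index, edges)
def stepA (st : PySem.Dict Int Int × Int × List (Int × Int)) (e : Int × Int) :
    PySem.Dict Int Int × Int × List (Int × Int) :=
  let m1 := if st.1.contains e.1 then st.1 else st.1.insert e.1 st.2.1
  let i1 := if st.1.contains e.1 then st.2.1 else st.2.1 + 1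
  let m2 := if m1.contains e.2 then m1 else m1.insert e.2 i1
  let i2 := if m1.contains e.2 then i1 else i1 + 1
  (m2, i2, st.2.2 ++ [(m2.getD e.1 0, m2.getD e.2 0)])

def transfer_edges (edges_list : List (Int × Int)) : List (Int × Int) :=
  (edges_list.foldl stepA ((PySem.Dict.empty : PySem.Dict Int Int), (0 : Int), ([] : List (Int × Int)))).2.2

-- ===== PORT B =====
-- one iteration of B's reverse pass: 'i -= 1; first[x] = i' (state = (first, i))
def revStep (st : PySem.Dict Int Int × Int) (x : Int) : PySem.Dict Int Int × Int :=
  (st.1.insert x (st.2 - 1), st.2 - 1)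

-- {x: r for r, x in enumerate(order)}
def dictStep (st : PySem.Dict Int Int × Int) (u : Int) : PySem.Dict Int Int × Int :=
  (st.1.insert u st.2, st.2 + 1)

def transfer_edges_alt (edges_list : List (Int × Int)) : List (Int × Int) :=
  let flat := edges_list.flatMap (fun e => [e.1, e.2])
  let first := (flat.reverse.foldl revStep ((PySem.Dict.empty : PySem.Dict Int Int), (flat.length : Int))).1
  let order := PySem.List.sorted (PySem.Dict.keys first) (fun x => first.getD x 0) false
  let rank := (order.foldl dictStep ((PySem.Dict.empty : PySem.Dict Int Int), (0 : Int))).1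
  edges_list.map (fun e => (rank.getD e.1 0, rank.getD e.2 0))

-- ===== PRECONDITION & SPEC =====
def Spec_transfer_edges (edges_list : List (Int × Int)) (out : List (Int × Int)) : Prop := out = transfer_edges_alt edges_list
instance (edges_list : List (Int × Int)) (out : List (Int × Int)) : Decidable (Spec_transfer_edges edges_list out) := by unfold Spec_transfer_edges; infer_instance

-- ===== CLAIM (what is proved, stated in full; the proofs are below) =====
def Claim_equal_transfer_edges : Prop := ∀ (edges_list : List (Int × Int)), Dom_transfer_edges edges_list → Spec_transfer_edges edges_list (transfer_edges edges_list)

-- ===== LEMMAS AND PROOFS =====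

-- index of the FIRST occurrence of x in l (proof-side helper)
def fidx : List Int → Int → Nat
  | [], _ => 0
  | c :: t, x => if x = c then 0 else fidx t x + 1

-- the index-map fold (as in the rank dict) applied to a key list K
def mk2 (K : List Int) : PySem.Dict Int Int × Int :=
  K.foldl dictStep ((PySem.Dict.empty : PySem.Dict Int Int), (0 : Int))

-- all endpoints of a list of edges, in edge order, u before v
def flatEnds (es : List (Int × Int)) : List Int := es.flatMap (fun e => [e.1, e.2])

lemma mk2_contains_fold (K : List Int) : ∀ (d : PySem.Dict Int Int) (i : Int) (k : Int),
    ((K.foldl dictStep (d, i)).1).contains k = (d.contains k || decide (k ∈ K)) := by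
  induction K with
  | nil => simp
  | cons x t ih =>
    intro d i k
    simp only [List.foldl_cons, dictStep, ih, PySem.Dict.contains_insert, List.mem_cons]
    by_cases hk : k = x
    · simp [hk]
    · have hb : (k == x) = false := by simpa using hk
      simp [hk, hb]

lemma mk2_append (K : List Int) (u : Int) :
    mk2 (K ++ [u]) = ((mk2 K).1.insert u (mk2 K).2, (mk2 K).2 + 1) := by
  simp [mk2, List.foldl_append, dictStep]

lemma mk2_contains (K : List Int) (k : Int) :
    (mk2 K).1.contains k = decide (k ∈ K) := by
  simpa using mk2_contains_fold K PySem.Dict.empty 0 k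

lemma set_add_of_mem (K : List Int) (x : Int) (h : x ∈ K) : PySem.Set.add K x = K := by
  simp [PySem.Set.add, PySem.Set.contains, h]

lemma set_add_of_not_mem (K : List Int) (x : Int) (h : x ∉ K) : PySem.Set.add K x = K ++ [x] := by
  simp [PySem.Set.add, PySem.Set.contains, h]

lemma nodup_set_add (K : List Int) (x : Int) (h : K.Nodup) : (PySem.Set.add K x).Nodup := by
  by_cases hx : x ∈ K
  · rw [set_add_of_mem K x hx]; exact h
  · rw [set_add_of_not_mem K x hx]
    refine List.Nodup.append h (List.nodup_singleton x) ?_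
    intro a ha hb
    simp only [List.mem_singleton] at hb
    exact hx (hb ▸ ha)

lemma mem_set_add_self (K : List Int) (x : Int) : x ∈ PySem.Set.add K x := by
  by_cases hx : x ∈ K
  · simpa [set_add_of_mem K x hx]
  · simp [set_add_of_not_mem K x hx]

lemma mem_set_add_of_mem (K : List Int) (x k : Int) (h : k ∈ K) : k ∈ PySem.Set.add K x := by
  by_cases hx : x ∈ K
  · simpa [set_add_of_mem K x hx]
  · simp [set_add_of_not_mem K x hx, h]

-- once a key is in K, extending K with more endpoints never changes its index
lemma getD_mk2_ext (xs : List Int) : ∀ (K : List Int) (k : Int), k ∈ K → K.Nodup →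
    ((mk2 (xs.foldl PySem.Set.add K)).1).getD k 0 = ((mk2 K).1).getD k 0 := by
  induction xs with
  | nil => intro K k _ _; rfl
  | cons x t ih =>
    intro K k hk hnd
    have h1 : k ∈ PySem.Set.add K x := mem_set_add_of_mem K x k hk
    have h2 : (PySem.Set.add K x).Nodup := nodup_set_add K x hnd
    rw [List.foldl_cons, ih _ _ h1 h2]
    by_cases hx : x ∈ K
    · rw [set_add_of_mem K x hx]
    · have hne : k ≠ x := fun h => hx (h ▸ hk)
      rw [set_add_of_not_mem K x hx, PySem.Dict.getD_eq_get?_getD,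
        PySem.Dict.getD_eq_get?_getD, mk2_append,
        PySem.Dict.get?_insert_of_ne _ _ hne]

-- one iteration of A's loop, in terms of key lists
lemma stepA_eq (K : List Int) (acc : List (Int × Int)) (u v : Int) :
    stepA ((mk2 K).1, (mk2 K).2, acc) (u, v) =
      ((mk2 (PySem.Set.add (PySem.Set.add K u) v)).1,
       (mk2 (PySem.Set.add (PySem.Set.add K u) v)).2,
       acc ++ [(((mk2 (PySem.Set.add (PySem.Set.add K u) v)).1).getD u 0,
                ((mk2 (PySem.Set.add (PySem.Set.add K u) v)).1).getD v 0)]) := by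
  have hKu1 : (mk2 (PySem.Set.add K u)).1
      = (if (mk2 K).1.contains u then (mk2 K).1 else (mk2 K).1.insert u (mk2 K).2) := by
    by_cases hu : u ∈ K
    · rw [set_add_of_mem K u hu]; simp [mk2_contains, hu]
    · rw [set_add_of_not_mem K u hu, mk2_append]; simp [mk2_contains, hu]
  have hKu2 : (mk2 (PySem.Set.add K u)).2
      = (if (mk2 K).1.contains u then (mk2 K).2 else (mk2 K).2 + 1) := by
    by_cases hu : u ∈ K
    · rw [set_add_of_mem K u hu]; simp [mk2_contains, hu]
    · rw [set_add_of_not_mem K u hu, mk2_append]; simp [mk2_contains, hu]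
  have hKv1 : (mk2 (PySem.Set.add (PySem.Set.add K u) v)).1
      = (if (mk2 (PySem.Set.add K u)).1.contains v then (mk2 (PySem.Set.add K u)).1
         else (mk2 (PySem.Set.add K u)).1.insert v (mk2 (PySem.Set.add K u)).2) := by
    by_cases hv : v ∈ PySem.Set.add K u
    · rw [set_add_of_mem _ v hv]; simp [mk2_contains, hv]
    · rw [set_add_of_not_mem _ v hv, mk2_append]; simp [mk2_contains, hv]
  have hKv2 : (mk2 (PySem.Set.add (PySem.Set.add K u) v)).2
      = (if (mk2 (PySem.Set.add K u)).1.contains v then (mk2 (PySem.Set.add K u)).2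
         else (mk2 (PySem.Set.add K u)).2 + 1) := by
    by_cases hv : v ∈ PySem.Set.add K u
    · rw [set_add_of_mem _ v hv]; simp [mk2_contains, hv]
    · rw [set_add_of_not_mem _ v hv, mk2_append]; simp [mk2_contains, hv]
  simp only [stepA]
  rw [← hKu1, ← hKu2, ← hKv1, ← hKv2]

-- A's loop, started from the state built out of a nodup key list K, produces lookups in the final table
lemma A_loop_inv (rest : List (Int × Int)) : ∀ (K : List Int) (acc : List (Int × Int)), K.Nodup →
    (rest.foldl stepA ((mk2 K).1, (mk2 K).2, acc)).2.2
      = acc ++ rest.map (fun e =>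
          (((mk2 ((flatEnds rest).foldl PySem.Set.add K)).1).getD e.1 0,
           ((mk2 ((flatEnds rest).foldl PySem.Set.add K)).1).getD e.2 0)) := by
  induction rest with
  | nil => intro K acc _; simp [flatEnds]
  | cons e t ih =>
    intro K acc hnd
    obtain ⟨u, v⟩ := e
    have hext : flatEnds ((u, v) :: t) = u :: v :: flatEnds t := rfl
    set K2 := PySem.Set.add (PySem.Set.add K u) v with hK2
    have hndK2 : K2.Nodup := nodup_set_add _ v (nodup_set_add K u hnd)
    have hfold : ((flatEnds ((u, v) :: t)).foldl PySem.Set.add K)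
        = (flatEnds t).foldl PySem.Set.add K2 := by
      rw [hext]; rfl
    rw [List.foldl_cons, stepA_eq, ih K2 _ hndK2]
    have hu : ((mk2 ((flatEnds t).foldl PySem.Set.add K2)).1).getD u 0
        = ((mk2 K2).1).getD u 0 :=
      getD_mk2_ext _ _ u (mem_set_add_of_mem _ v u (mem_set_add_self K u)) hndK2
    have hv : ((mk2 ((flatEnds t).foldl PySem.Set.add K2)).1).getD v 0
        = ((mk2 K2).1).getD v 0 :=
      getD_mk2_ext _ _ v (mem_set_add_self _ v) hndK2
    rw [hfold]
    simp only [List.map_cons, hu, hv]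
    simp
    exact ⟨rfl, rfl⟩

-- ---- B side: the reverse pass computes first-occurrence indices ----

lemma revfold (l : List Int) : ∀ (d : PySem.Dict Int Int) (n : Int),
    (l.reverse.foldl revStep (d, n)).2 = n - l.length
    ∧ (∀ x, ((l.reverse.foldl revStep (d, n)).1).get? x
        = if x ∈ l then some (n - l.length + fidx l x) else d.get? x)
    ∧ (d.keys.Nodup → ((l.reverse.foldl revStep (d, n)).1).keys.Nodup) := by
  induction l with
  | nil => intro d n; simp
  | cons c t ih =>
    intro d n
    rw [List.reverse_cons, List.foldl_append]
    obtain ⟨h2, hget, hnd⟩ := ih d n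
    refine ⟨?_, ?_, ?_⟩
    · simp only [List.foldl_cons, List.foldl_nil, revStep, h2, List.length_cons]
      push_cast; ring
    · intro x
      simp only [List.foldl_cons, List.foldl_nil, revStep]
      by_cases hx : x = c
      · subst hx
        rw [PySem.Dict.get?_insert_self, h2]
        simp only [List.mem_cons, true_or, if_true, fidx, List.length_cons]
        congr 1
        push_cast; ring
      · rw [PySem.Dict.get?_insert_of_ne _ _ hx, hget x]
        by_cases hm : x ∈ t
        · simp only [List.mem_cons, hm, or_true, if_true, fidx, if_neg hx, List.length_cons]
          congr 1
          push_cast; ring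
        · have : x ∈ c :: t ↔ False := by simp [hx, hm]
          simp [hm, this]
    · intro h
      simp only [List.foldl_cons, List.foldl_nil, revStep]
      exact PySem.Dict.nodup_keys_insert _ _ _ (hnd h)

-- ---- dedup structure ----

lemma foldl_add_skip (t : List Int) : ∀ (K : List Int) (x : Int), x ∈ K →
    t.foldl PySem.Set.add K = (t.filter (fun y => y != x)).foldl PySem.Set.add K := by
  induction t with
  | nil => intro K x _; simp
  | cons c s ih =>
    intro K x hx
    by_cases hc : c = x
    · subst hc
      have : PySem.Set.add K c = K := set_add_of_mem K c hx
      simp only [List.foldl_cons, List.filter_cons, bne_self_eq_false, this]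
      exact ih K c hx
    · have hb : (c != x) = true := by simpa using hc
      simp only [List.foldl_cons, List.filter_cons, hb, if_true]
      exact ih (PySem.Set.add K c) x (mem_set_add_of_mem K c x hx)

lemma foldl_add_cons (s : List Int) : ∀ (A : List Int) (x : Int), (∀ y ∈ s, y ≠ x) →
    s.foldl PySem.Set.add (x :: A) = x :: s.foldl PySem.Set.add A := by
  induction s with
  | nil => intro A x _; simp
  | cons c r ih =>
    intro A x h
    have hcx : c ≠ x := h c (by simp)
    have hadd : PySem.Set.add (x :: A) c = x :: PySem.Set.add A c := by
      by_cases hcA : c ∈ A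
      · rw [set_add_of_mem _ c (by simp [hcA]), set_add_of_mem A c hcA]
      · have : c ∉ x :: A := by simp [hcx, hcA]
        rw [set_add_of_not_mem _ c this, set_add_of_not_mem A c hcA]
        rfl
    simp only [List.foldl_cons, hadd]
    exact ih (PySem.Set.add A c) x (fun y hy => h y (by simp [hy]))

lemma dedup_cons (x : Int) (t : List Int) :
    PySem.List.dedup (x :: t) = x :: PySem.List.dedup (t.filter (fun y => y != x)) := by
  have h1 : PySem.List.dedup (x :: t) = (x :: t).foldl PySem.Set.add [] := by
    rw [PySem.List.dedup_eq_ofList, PySem.Set.ofList_eq_foldl]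
  have h2 : PySem.List.dedup (t.filter (fun y => y != x))
      = (t.filter (fun y => y != x)).foldl PySem.Set.add [] := by
    rw [PySem.List.dedup_eq_ofList, PySem.Set.ofList_eq_foldl]
  rw [h1, h2, List.foldl_cons]
  have hxx : PySem.Set.add [] x = [x] := by rfl
  rw [hxx, foldl_add_skip t [x] x (by simp)]
  exact foldl_add_cons _ [] x (fun y hy => by simpa using (List.of_mem_filter hy))

-- filtering preserves the relative order of first occurrences
lemma fidx_filter_mono (t : List Int) : ∀ (p : Int → Bool) (a b : Int),
    a ∈ t.filter p → b ∈ t.filter p →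
    fidx (t.filter p) a < fidx (t.filter p) b → fidx t a < fidx t b := by
  induction t with
  | nil => intro p a b h; simp at h
  | cons c s ih =>
    intro p a b ha hb hlt
    by_cases hpc : p c
    · have hf : (c :: s).filter p = c :: s.filter p := by simp [hpc]
      rw [hf] at ha hb hlt
      by_cases hac : a = c
      · subst hac
        simp only [fidx] at hlt ⊢
        by_cases hbc : b = a
        · subst hbc; simp at hlt
        · simp [hbc]
      · by_cases hbc : b = c
        · subst hbc; simp [fidx, hac] at hlt
        · simp only [fidx, if_neg hac, if_neg hbc] at hlt ⊢
          have ha' : a ∈ s.filter p := by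
            rcases List.mem_cons.mp ha with h | h
            · exact absurd h hac
            · exact h
          have hb' : b ∈ s.filter p := by
            rcases List.mem_cons.mp hb with h | h
            · exact absurd h hbc
            · exact h
          exact Nat.succ_lt_succ (ih p a b ha' hb' (Nat.lt_of_succ_lt_succ hlt))
    · have hf : (c :: s).filter p = s.filter p := by simp [hpc]
      rw [hf] at ha hb hlt
      have hac : a ≠ c := fun h => by
        have := List.of_mem_filter ha; rw [h] at this; exact hpc this
      have hbc : b ≠ c := fun h => by
        have := List.of_mem_filter hb; rw [h] at this; exact hpc this
      simp only [fidx, if_neg hac, if_neg hbc]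
      exact Nat.succ_lt_succ (ih p a b ha hb hlt)

-- in first-appearance dedup order, first-occurrence indices strictly increase
lemma pairwise_fidx_aux (n : Nat) : ∀ (l : List Int), l.length ≤ n →
    (PySem.List.dedup l).Pairwise (fun a b => fidx l a < fidx l b) := by
  induction n with
  | zero =>
    intro l hl
    rw [List.length_eq_zero_iff.mp (Nat.le_zero.mp hl)]
    simp [PySem.List.dedup_eq_ofList]
  | succ n ih =>
    intro l hl
    match l with
    | [] => simp [PySem.List.dedup_eq_ofList]
    | x :: t =>
      rw [dedup_cons]
      have hlen : (t.filter (fun y => y != x)).length ≤ n :=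
        le_trans (List.length_filter_le _ t) (Nat.le_of_succ_le_succ hl)
      have hP := ih (t.filter (fun y => y != x)) hlen
      constructor
      · intro b hb
        have hbf : b ∈ t.filter (fun y => y != x) := (PySem.Set.mem_ofList ..).mp
          (by rw [← PySem.List.dedup_eq_ofList]; exact hb)
        have hbx : b ≠ x := by simpa using (List.of_mem_filter hbf)
        simp only [fidx, if_neg hbx]
        exact Nat.succ_pos _
      · refine List.Pairwise.imp_of_mem ?_ hP
        intro a b ha hb hlt
        have haf : a ∈ t.filter (fun y => y != x) := (PySem.Set.mem_ofList ..).mp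
          (by rw [← PySem.List.dedup_eq_ofList]; exact ha)
        have hbf : b ∈ t.filter (fun y => y != x) := (PySem.Set.mem_ofList ..).mp
          (by rw [← PySem.List.dedup_eq_ofList]; exact hb)
        have hax : a ≠ x := by simpa using (List.of_mem_filter haf)
        have hbx : b ≠ x := by simpa using (List.of_mem_filter hbf)
        have := fidx_filter_mono t (fun y => y != x) a b haf hbf hlt
        simpa [fidx, hax, hbx] using Nat.succ_lt_succ this

lemma pairwise_fidx (l : List Int) :
    (PySem.List.dedup l).Pairwise (fun a b => fidx l a < fidx l b) :=
  pairwise_fidx_aux l.length l le_rfl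

-- B's first-occurrence table and sort key, named for the proof
def firstD (l : List Int) : PySem.Dict Int Int :=
  (l.reverse.foldl revStep ((PySem.Dict.empty : PySem.Dict Int Int), (l.length : Int))).1

def fkey (l : List Int) : Int → Int := fun x => (firstD l).getD x 0

lemma firstD_get? (l : List Int) (x : Int) :
    (firstD l).get? x = if x ∈ l then some ((fidx l x : Int)) else none := by
  obtain ⟨_, hget, _⟩ := revfold l PySem.Dict.empty (l.length : Int)
  rw [firstD, hget x, PySem.Dict.get?_empty]
  split_ifs with h
  · congr 1; ring
  · rfl

-- sorting the table's keys by first-occurrence position reproduces first-appearance order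
lemma sorted_keys_eq_dedup (l : List Int) :
    PySem.List.sorted (firstD l).keys (fkey l) false = PySem.List.dedup l := by
  have hmemkeys : ∀ x, x ∈ (firstD l).keys ↔ x ∈ l := by
    intro x
    rw [← PySem.Dict.contains_iff_mem_keys, PySem.Dict.contains_eq_isSome_get?, firstD_get? l x]
    by_cases h : x ∈ l <;> simp [h]
  have hndkeys : (firstD l).keys.Nodup := by
    obtain ⟨_, _, hnd⟩ := revfold l PySem.Dict.empty (l.length : Int)
    exact hnd (by simp [PySem.Dict.keys_empty])
  have hperm : (PySem.List.dedup l).Perm (firstD l).keys := by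
    rw [List.perm_ext_iff_of_nodup (PySem.List.nodup_dedup l) hndkeys]
    intro a
    rw [PySem.List.mem_dedup l a, hmemkeys]
  have hpw : (PySem.List.dedup l).Pairwise (fun a b => fkey l a < fkey l b) := by
    refine List.Pairwise.imp_of_mem ?_ (pairwise_fidx l)
    intro a b ha hb hlt
    have ha' : a ∈ l := (PySem.List.mem_dedup l a).mp ha
    have hb' : b ∈ l := (PySem.List.mem_dedup l b).mp hb
    simp only [fkey, PySem.Dict.getD_eq_get?_getD, firstD_get? l a, firstD_get? l b,
      ha', hb', if_true, Option.getD_some]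
    exact_mod_cast hlt
  exact PySem.List.sorted_eq_of_perm_of_pairwise_lt _ _ _ hperm hpw

-- ===== VERDICT (by name: the statement is the Claim_ definition above) =====
theorem transfer_edges_spec : Claim_equal_transfer_edges := by
  intro edges_list _
  unfold Spec_transfer_edges
  have hB : transfer_edges_alt edges_list = edges_list.map (fun e =>
      ((mk2 (PySem.List.sorted (firstD (flatEnds edges_list)).keys (fkey (flatEnds edges_list)) false)).1.getD e.1 0,
       (mk2 (PySem.List.sorted (firstD (flatEnds edges_list)).keys (fkey (flatEnds edges_list)) false)).1.getD e.2 0)) := rfl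
  have hA : transfer_edges edges_list = edges_list.map (fun e =>
      ((mk2 (PySem.List.dedup (flatEnds edges_list))).1.getD e.1 0,
       (mk2 (PySem.List.dedup (flatEnds edges_list))).1.getD e.2 0)) := by
    have h0 : ((PySem.Dict.empty : PySem.Dict Int Int), (0 : Int), ([] : List (Int × Int)))
        = ((mk2 []).1, (mk2 []).2, ([] : List (Int × Int))) := rfl
    have hd : (flatEnds edges_list).foldl PySem.Set.add [] = PySem.List.dedup (flatEnds edges_list) := by
      rw [PySem.List.dedup_eq_ofList, PySem.Set.ofList_eq_foldl]
    unfold transfer_edges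
    rw [h0, A_loop_inv edges_list [] [] List.nodup_nil, hd, List.nil_append]
  rw [hA, hB, sorted_keys_eq_dedup (flatEnds edges_list)]
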